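-- pv_equiv track=rewrite | github.com/AbirBodhisatwa/Opinions-Project | scdb_linker.py | opinions_by_year
-- ===== SOURCE A (Python) =====
-- def opinions_by_year(m_dic,l_dic):
--     opinions_year = {}
--
--     for s_id in m_dic.keys():
--         if s_id[:4] not in opinions_year:
--             opinions_year[s_id[:4]] = 0
--         opinions_year[s_id[:4]] += 1
--
--     for s_id in l_dic.keys():
--         if s_id[:4] not in opinions_year:
--             opinions_year[s_id[:4]] = 0
--         opinions_year[s_id[:4]] += 1
--
--     return opinions_year
-- ===== SOURCE B (Python) =====
-- def opinions_by_year(m_dic, l_dic):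
--     prefixes = [k[:4] for k in m_dic] + [k[:4] for k in l_dic]
--     sp = sorted(prefixes)
--     counts = {}
--     i = 0
--     while i < len(sp):                      # run-length scan over the sorted list
--         j = i + 1
--         while j < len(sp) and sp[j] == sp[i]:
--             j += 1
--         counts[sp[i]] = j - i
--         i = j
--     return {p: counts[p] for p in dict.fromkeys(prefixes)}
-- ===== Notes on version B (the rewrite author's own statement) =====
-- stated objective: alternative
-- what changed: Replaces A's incremental dict membership-test-and-increment tally with a sort-based scheme: build the flat list of 4-char prefixes, sort it, run-length-scan the sorted list with two nested index loops to get each prefix's multiplicity, then emit the counts in first-occurrence order via dict.fromkeys.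
import Mathlib
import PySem

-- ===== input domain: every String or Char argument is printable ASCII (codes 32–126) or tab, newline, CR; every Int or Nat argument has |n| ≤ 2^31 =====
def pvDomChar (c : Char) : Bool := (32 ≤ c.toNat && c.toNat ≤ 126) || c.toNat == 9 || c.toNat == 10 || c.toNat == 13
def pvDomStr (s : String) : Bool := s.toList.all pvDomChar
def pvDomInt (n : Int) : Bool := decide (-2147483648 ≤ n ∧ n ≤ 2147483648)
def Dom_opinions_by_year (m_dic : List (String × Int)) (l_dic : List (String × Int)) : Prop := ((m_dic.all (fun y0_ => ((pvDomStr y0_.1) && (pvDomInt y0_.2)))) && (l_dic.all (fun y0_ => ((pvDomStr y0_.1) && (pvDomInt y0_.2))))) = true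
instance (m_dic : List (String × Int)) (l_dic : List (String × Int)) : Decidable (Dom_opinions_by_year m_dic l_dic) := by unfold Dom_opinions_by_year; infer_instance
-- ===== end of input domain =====

-- B replaces A's incremental hash tally with a sort + run-length scan over the sorted prefix list,
-- then reads the counts back in first-occurrence order (alternative algorithm, same results).


-- ===== PORT A =====
-- s_id[:4]
def pvPrefix4 (s : String) : String := PySem.Str.slice s none (some 4)

-- the body of both of A's loops: membership test + init-to-0, then += 1
def pvStepA (d : PySem.Dict String Int) (s_id : String) : PySem.Dict String Int :=
  let p := pvPrefix4 s_id
  let d' := if d.contains p then d else d.insert p 0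
  d'.insert p (d'.getD p 0 + 1)

def opinions_by_year (m_dic : List (String × Int)) (l_dic : List (String × Int)) : List (String × Int) :=
  let d0 : PySem.Dict String Int := PySem.Dict.empty
  let d1 := (m_dic.map Prod.fst).foldl pvStepA d0
  let d2 := (l_dic.map Prod.fst).foldl pvStepA d1
  d2.items

-- ===== PORT B =====
-- the two nested while loops of Source B: emit (run head, run length) for each maximal run of
-- equal adjacent elements, then continue after the run (j - i = 1 + number of following equals)
def pvRuns : List String → List (String × Int)
  | [] => []
  | x :: xs =>
    (x, 1 + (xs.takeWhile (fun y => y == x)).length) :: pvRuns (xs.dropWhile (fun y => y == x))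
termination_by l => l.length
decreasing_by
  exact Nat.lt_succ_of_le (List.dropWhile_sublist _).length_le

def opinions_by_year_alt (m_dic : List (String × Int)) (l_dic : List (String × Int)) : List (String × Int) :=
  let prefixes := m_dic.map (fun kv => pvPrefix4 kv.1) ++ l_dic.map (fun kv => pvPrefix4 kv.1)
  let sp := PySem.List.sorted prefixes (fun x => x) false
  let counts := (pvRuns sp).foldl (fun d pc => d.insert pc.1 pc.2) PySem.Dict.empty
  -- counts[p]: every p drawn from prefixes is present in counts, so the lookup never raises;
  -- ported as getD with an unused default
  (PySem.List.dedup prefixes).map (fun p => (p, counts.getD p 0))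

-- ===== PRECONDITION & SPEC =====
def Spec_opinions_by_year (m_dic : List (String × Int)) (l_dic : List (String × Int)) (out : List (String × Int)) : Prop := out = opinions_by_year_alt m_dic l_dic
instance (m_dic : List (String × Int)) (l_dic : List (String × Int)) (out : List (String × Int)) : Decidable (Spec_opinions_by_year m_dic l_dic out) := by unfold Spec_opinions_by_year; infer_instance

-- ===== CLAIM (what is proved, stated in full; the proofs are below) =====
def Claim_equal_opinions_by_year : Prop := ∀ (m_dic : List (String × Int)) (l_dic : List (String × Int)), Dom_opinions_by_year m_dic l_dic → Spec_opinions_by_year m_dic l_dic (opinions_by_year m_dic l_dic)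

-- ===== LEMMAS AND PROOFS =====

-- A's loop body is the insert-(getD+1) counter step on the 4-char prefix
theorem pvStepA_eq (d : PySem.Dict String Int) (s : String) :
    pvStepA d s = d.insert (pvPrefix4 s) (d.getD (pvPrefix4 s) 0 + 1) := by
  unfold pvStepA
  dsimp only
  by_cases h : d.contains (pvPrefix4 s) = true
  · rw [if_pos h]
  · rw [if_neg h, PySem.Dict.getD_insert_self, PySem.Dict.insert_insert_self,
      PySem.Dict.getD_of_not_contains d 0 (by simpa using h)]

-- A's result: distinct prefixes in first-occurrence order, each with its total count
theorem opinions_by_year_eq_counts (m_dic l_dic : List (String × Int)) :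
    opinions_by_year m_dic l_dic =
      (PySem.Set.ofList (m_dic.map (fun kv => pvPrefix4 kv.1) ++ l_dic.map (fun kv => pvPrefix4 kv.1))).map
        (fun p => (p, ((m_dic.map (fun kv => pvPrefix4 kv.1) ++ l_dic.map (fun kv => pvPrefix4 kv.1)).count p : Int))) := by
  unfold opinions_by_year
  have hstep : pvStepA =
      fun d s => d.insert (pvPrefix4 s) (d.getD (pvPrefix4 s) 0 + 1) :=
    funext fun d => funext fun s => pvStepA_eq d s
  rw [hstep]
  simp only [← List.foldl_append]
  rw [← List.foldl_map (f := pvPrefix4)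
        (g := fun (d : PySem.Dict String Int) x => d.insert x (d.getD x 0 + 1)),
      PySem.Dict.foldl_insert_getD_add_one_eq_counter, PySem.Dict.items_counter]
  simp [List.map_map, Function.comp_def]

-- removing an absent element is a no-op
theorem pv_discard_of_not_mem (s : List String) (x : String) (h : x ∉ s) :
    PySem.Set.discard s x = s := by
  simp [PySem.Set.discard]
  exact fun a ha => ne_of_mem_of_not_mem ha h

-- set(x :: t ++ r) when t is all copies of x and x does not occur in r
theorem pv_ofList_run (x : String) (t r : List String)
    (ht : ∀ y ∈ t, y = x) (hr : x ∉ r) :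
    PySem.Set.ofList (x :: (t ++ r)) = x :: PySem.Set.ofList r := by
  induction t with
  | nil =>
      rw [List.nil_append, PySem.Set.ofList_cons,
        pv_discard_of_not_mem _ _ (by simpa [PySem.Set.mem_ofList] using hr)]
  | cons y t' ih =>
      have hy : y = x := ht y (by simp)
      subst hy
      have h' : PySem.Set.ofList (y :: (t' ++ r)) = y :: PySem.Set.ofList r :=
        ih (fun z hz => ht z (by simp [hz]))
      calc PySem.Set.ofList (y :: ((y :: t') ++ r))
          = PySem.Set.ofList (y :: y :: (t' ++ r)) := by simp
        _ = y :: PySem.Set.discard (PySem.Set.ofList (y :: (t' ++ r))) y :=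
            PySem.Set.ofList_cons _ _
        _ = y :: PySem.Set.discard (y :: PySem.Set.ofList r) y := by rw [h']
        _ = y :: PySem.Set.discard (PySem.Set.ofList r) y := by
            simp [PySem.Set.discard]
        _ = y :: PySem.Set.ofList r := by
            rw [pv_discard_of_not_mem _ _ (by simpa [PySem.Set.mem_ofList] using hr)]

-- run-length scan of a sorted list = (distinct element, multiplicity) pairs
theorem pvRuns_of_pairwise (l : List String) (hs : l.Pairwise (· ≤ ·)) :
    pvRuns l = (PySem.Set.ofList l).map (fun p => (p, (l.count p : Int))) := by
  induction l using pvRuns.induct with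
  | case1 => simp [pvRuns]
  | case2 x xs ih =>
      have hx : ∀ y ∈ xs, x ≤ y := fun y hy => (List.pairwise_cons.mp hs).1 y hy
      have hxs : xs.Pairwise (· ≤ ·) := (List.pairwise_cons.mp hs).2
      set t := xs.takeWhile (fun y => y == x) with ht_def
      set r := xs.dropWhile (fun y => y == x) with hr_def
      have hsplit : xs = t ++ r := (List.takeWhile_append_dropWhile).symm
      have ht : ∀ y ∈ t, y = x := by
        intro y hy
        have := List.mem_takeWhile_imp hy
        simpa using this
      have hrp : r.Pairwise (· ≤ ·) := hxs.sublist (List.dropWhile_sublist _)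
      have hxr : x ∉ r := by
        intro hmem
        cases hz : r with
        | nil => simp [hz] at hmem
        | cons z r' =>
            have hzne : ¬ (z == x) = true := by
              have := List.head?_dropWhile_not (fun y => y == x) xs
              rw [← hr_def, hz] at this
              simpa using this
            have hzx : z ≠ x := by simpa using hzne
            have hxz : x < z := lt_of_le_of_ne
              (hx z (by rw [hsplit, hz]; simp)) (Ne.symm hzx)
            rw [hz] at hmem
            rcases List.mem_cons.mp hmem with h | h
            · exact absurd h.symm hzx
            · have hzl : z ≤ x := (List.pairwise_cons.mp (hz ▸ hrp)).1 x h
              exact absurd (lt_of_lt_of_le hxz hzl) (lt_irrefl x)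
      have hofl : PySem.Set.ofList (x :: xs) = x :: PySem.Set.ofList r := by
        rw [hsplit]; exact pv_ofList_run x t r ht hxr
      have hrec : pvRuns r = (PySem.Set.ofList r).map (fun p => (p, (r.count p : Int))) :=
        ih hrp
      have hcx : (x :: xs).count x = 1 + t.length := by
        have h1 : t.count x = t.length := by
          rw [List.count_eq_length]
          intro y hy; exact ((ht y hy).symm ▸ rfl)
        have h2 : r.count x = 0 := List.count_eq_zero.mpr hxr
        rw [List.count_cons_self, hsplit, List.count_append, h1, h2]
        omega
      have hunfold : pvRuns (x :: xs) = (x, (1 : Int) + t.length) :: pvRuns r := by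
        rw [pvRuns]
      rw [hunfold, hofl, List.map_cons, hrec]
      congr 1
      · rw [hcx]; push_cast; ring_nf
      · apply List.map_congr_left
        intro p hp
        have hpr : p ∈ r := (PySem.Set.mem_ofList _ _).mp hp
        have hpx : p ≠ x := fun e => hxr (e ▸ hpr)
        have hct : t.count p = 0 := List.count_eq_zero.mpr
          (fun hmem => hpx (ht p hmem))
        have hcp : (x :: xs).count p = r.count p := by
          rw [List.count_cons, hsplit, List.count_append, hct,
            if_neg (by simpa using Ne.symm hpx)]
          omega
        rw [hcp]

-- Source B's counts dict: looking up any element of the sorted list yields its multiplicity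
theorem pv_counts_getD (sp : List String) (hsp : sp.Pairwise (· ≤ ·))
    (p : String) (hp : p ∈ sp) :
    ((pvRuns sp).foldl (fun d pc => d.insert pc.1 pc.2)
      (PySem.Dict.empty : PySem.Dict String Int)).getD p 0 = sp.count p := by
  rw [pvRuns_of_pairwise sp hsp]
  have hitems : (((PySem.Set.ofList sp).map (fun q => (q, (sp.count q : Int)))).foldl
      (fun d pc => d.insert pc.1 pc.2) (PySem.Dict.empty : PySem.Dict String Int)).items
      = (PySem.Set.ofList sp).map (fun q => (q, (sp.count q : Int))) := by
    have h := PySem.Dict.items_foldl_insert_fresh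
      (l := (PySem.Set.ofList sp).map (fun q => (q, (sp.count q : Int))))
      (k := Prod.fst) (v := Prod.snd)
      (d := (PySem.Dict.empty : PySem.Dict String Int))
      (by intro a _; exact PySem.Dict.contains_empty _)
      (by simp [List.map_map, Function.comp_def])
    simpa using h
  have hmem : (p, (sp.count p : Int)) ∈
      (((PySem.Set.ofList sp).map (fun q => (q, (sp.count q : Int)))).foldl
        (fun d pc => d.insert pc.1 pc.2) (PySem.Dict.empty : PySem.Dict String Int)).items := by
    rw [hitems]
    exact List.mem_map.mpr ⟨p, (PySem.Set.mem_ofList _ _).mpr hp, rfl⟩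
  have hnd : (((PySem.Set.ofList sp).map (fun q => (q, (sp.count q : Int)))).foldl
      (fun d pc => d.insert pc.1 pc.2) (PySem.Dict.empty : PySem.Dict String Int)).keys.Nodup := by
    simp only [PySem.Dict.keys]
    rw [hitems]
    simp [List.map_map, Function.comp_def]
  exact PySem.Dict.getD_of_mem_items _ hmem hnd 0

-- B's result in the same closed form
theorem opinions_by_year_alt_eq_counts (m_dic l_dic : List (String × Int)) :
    opinions_by_year_alt m_dic l_dic =
      (PySem.Set.ofList (m_dic.map (fun kv => pvPrefix4 kv.1) ++ l_dic.map (fun kv => pvPrefix4 kv.1))).map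
        (fun p => (p, ((m_dic.map (fun kv => pvPrefix4 kv.1) ++ l_dic.map (fun kv => pvPrefix4 kv.1)).count p : Int))) := by
  unfold opinions_by_year_alt
  simp only [PySem.List.dedup_eq_ofList]
  apply List.map_congr_left
  intro p hp
  set P := m_dic.map (fun kv => pvPrefix4 kv.1) ++ l_dic.map (fun kv => pvPrefix4 kv.1) with hP
  have hpP : p ∈ P := (PySem.Set.mem_ofList _ _).mp hp
  have hsorted : (PySem.List.sorted P (fun x => x) false).Pairwise (· ≤ ·) := by
    simpa using PySem.List.sorted_pairwise P (fun x => x)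
  have hps : p ∈ PySem.List.sorted P (fun x => x) false :=
    (PySem.List.mem_sorted _ _ _ _).mpr hpP
  rw [pv_counts_getD _ hsorted p hps,
    (PySem.List.sorted_perm P (fun x => x) false).count_eq p]

-- ===== VERDICT (by name: the statement is the Claim_ definition above) =====
theorem opinions_by_year_spec : Claim_equal_opinions_by_year := by
  intro m_dic l_dic _
  show opinions_by_year m_dic l_dic = opinions_by_year_alt m_dic l_dic
  rw [opinions_by_year_eq_counts, opinions_by_year_alt_eq_counts]
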